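-- pv_equiv track=rewrite | github.com/suminjeff/baekjoon | 백준/Gold/30797. 가희와 여행가요/가희와 여행가요.py | solve
-- ===== SOURCE A (Python) =====
-- def solve(n, q, edge):
--     def find(x):
--         if parent[x] != x:
--             parent[x] = find(parent[x])
--         return parent[x]
--
--     def union(x, y):
--         x, y = find(x), find(y)
--         parent[max(x, y)] = min(x, y)
--
--     parent = [_ for _ in range(n+1)]
--     edge.sort(key=lambda x: (x[2], x[3]))
--
--     mst = 0
--     cnt = 0
--     last_time = 0
--     for x, y, c, t in edge:
--         p, q = find(x), find(y)
--         if p != q: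
--             union(p, q)
--             mst += c
--             cnt += 1
--             last_time = max(last_time, t)
--
--     if cnt != n-1:
--         return [-1]
--
--     return [last_time, mst]
-- ===== SOURCE B (Python) =====
-- def solve(n, q, edge):
--     # Kruskal order, but connectivity via a flat component-label list that is
--     # rewritten on each merge (no union-find, no recursion).
--     edge.sort(key=lambda x: (x[2], x[3]))
--     comp = list(range(n + 1))
--     mst = 0
--     cnt = 0
--     last_time = 0
--     for x, y, c, t in edge:
--         rx, ry = comp[x], comp[y]
--         if rx != ry:
--             lo, hi = (rx, ry) if rx < ry else (ry, rx)
--             comp = [lo if v == hi else v for v in comp]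
--             mst += c
--             cnt += 1
--             last_time = max(last_time, t)
--     if cnt != n - 1:
--         return [-1]
--     return [last_time, mst]
-- ===== Notes on version B (the rewrite author's own statement) =====
-- stated objective: alternative
-- what changed: Replaces A's recursive union-find with path compression by a flat component-label list: each node's current component label is read directly, and on an accepted edge every occurrence of the larger label is rewritten to the smaller one in a single pass, so there is no recursion and no parent forest.
import Mathlib
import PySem

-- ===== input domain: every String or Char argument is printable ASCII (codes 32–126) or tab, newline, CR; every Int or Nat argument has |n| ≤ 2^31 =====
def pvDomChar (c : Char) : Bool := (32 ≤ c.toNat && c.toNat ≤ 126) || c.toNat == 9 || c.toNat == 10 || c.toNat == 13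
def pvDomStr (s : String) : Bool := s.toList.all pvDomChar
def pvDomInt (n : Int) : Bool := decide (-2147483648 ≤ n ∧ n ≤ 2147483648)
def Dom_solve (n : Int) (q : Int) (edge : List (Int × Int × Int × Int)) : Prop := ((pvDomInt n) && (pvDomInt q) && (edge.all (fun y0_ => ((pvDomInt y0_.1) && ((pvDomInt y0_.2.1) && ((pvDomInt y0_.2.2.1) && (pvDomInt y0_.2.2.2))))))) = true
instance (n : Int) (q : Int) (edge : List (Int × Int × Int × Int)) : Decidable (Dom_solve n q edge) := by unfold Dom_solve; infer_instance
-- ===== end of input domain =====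

-- B replaces A's recursive union-find (path compression) by a flat component-label
-- list rewritten on each accepted edge; same Kruskal edge order, same return value.
-- Both A and B sort the `edge` argument in place (same observable mutation); the
-- equivalence proved here is about the return value.

-- ===== PORT A =====
-- find(x) with path compression. Python's recursion is unbounded; the port carries
-- fuel, and the proofs below show `length + 2` steps always suffice on admitted
-- inputs (parent links strictly decrease).
def findA : Nat → List Int → Int → List Int × Int
  | 0, parent, _ => (parent, 0)
  | fuel+1, parent, x =>
    let px := PySem.List.pyGetD parent x 0
    if px ≠ x then
      let r := findA fuel parent px
      let parent' := PySem.List.pySetD r.1 x r.2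
      (parent', PySem.List.pyGetD parent' x 0)
    else (parent, px)

def unionA (parent : List Int) (x y : Int) : List Int :=
  let f1 := findA (parent.length + 2) parent x
  let f2 := findA (f1.1.length + 2) f1.1 y
  PySem.List.pySetD f2.1 (max f1.2 f2.2) (min f1.2 f2.2)

-- one iteration of A's `for x, y, c, t in edge` loop over (parent, mst, cnt, last_time)
def stepA (st : List Int × Int × Int × Int) (e : Int × Int × Int × Int) :
    List Int × Int × Int × Int :=
  let f1 := findA (st.1.length + 2) st.1 e.1
  let f2 := findA (f1.1.length + 2) f1.1 e.2.1
  if f1.2 ≠ f2.2 then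
    (unionA f2.1 f1.2 f2.2, st.2.1 + e.2.2.1, st.2.2.1 + 1, max st.2.2.2 e.2.2.2)
  else (f2.1, st.2.1, st.2.2.1, st.2.2.2)

def solve (n : Int) (q : Int) (edge : List (Int × Int × Int × Int)) : List Int :=
  let parent := PySem.List.pyRange 0 (n+1) 1
  let es := PySem.List.sorted2 edge (fun e => e.2.2.1) (fun e => e.2.2.2)
  let st := es.foldl stepA (parent, 0, 0, 0)
  if st.2.2.1 ≠ n - 1 then [-1] else [st.2.2.2, st.2.1]

-- ===== PORT B =====
-- one iteration of B's loop over (comp, mst, cnt, last_time)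
def stepB (st : List Int × Int × Int × Int) (e : Int × Int × Int × Int) :
    List Int × Int × Int × Int :=
  let rx := PySem.List.pyGetD st.1 e.1 0
  let ry := PySem.List.pyGetD st.1 e.2.1 0
  if rx ≠ ry then
    let lo := if rx < ry then rx else ry
    let hi := if rx < ry then ry else rx
    (st.1.map (fun v => if v = hi then lo else v),
     st.2.1 + e.2.2.1, st.2.2.1 + 1, max st.2.2.2 e.2.2.2)
  else (st.1, st.2.1, st.2.2.1, st.2.2.2)

def solve_alt (n : Int) (q : Int) (edge : List (Int × Int × Int × Int)) : List Int :=
  let es := PySem.List.sorted2 edge (fun e => e.2.2.1) (fun e => e.2.2.2)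
  let comp := PySem.List.pyRange 0 (n+1) 1
  let st := es.foldl stepB (comp, 0, 0, 0)
  if st.2.2.1 ≠ n - 1 then [-1] else [st.2.2.2, st.2.1]

-- ===== PRECONDITION & SPEC =====
-- Pre_ admits exactly the inputs on which the Python A returns: every edge endpoint
-- must be a valid Python index into the parent list of length n+1 (A raises
-- IndexError otherwise, and B raises there too).
def Pre_solve (n : Int) (q : Int) (edge : List (Int × Int × Int × Int)) : Prop :=
  ∀ e ∈ edge, (-(n+1) ≤ e.1 ∧ e.1 ≤ n) ∧ (-(n+1) ≤ e.2.1 ∧ e.2.1 ≤ n)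
instance (n : Int) (q : Int) (edge : List (Int × Int × Int × Int)) : Decidable (Pre_solve n q edge) := by unfold Pre_solve; infer_instance

def pvWitness_solve : Int × Int × (List (Int × Int × Int × Int)) :=
  (3, 3, [(1, 2, 5, 7), (2, 3, 1, 2), (0, 1, 2, 2)])

def Spec_solve (n : Int) (q : Int) (edge : List (Int × Int × Int × Int)) (out : List Int) : Prop := out = solve_alt n q edge
instance (n : Int) (q : Int) (edge : List (Int × Int × Int × Int)) (out : List Int) : Decidable (Spec_solve n q edge out) := by unfold Spec_solve; infer_instance

-- ===== CLAIM (what is proved, stated in full; the proofs are below) =====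
def Claim_equal_solve : Prop := ∀ (n : Int) (q : Int) (edge : List (Int × Int × Int × Int)), Dom_solve n q edge → Pre_solve n q edge → Spec_solve n q edge (solve n q edge)

-- ===== LEMMAS AND PROOFS =====

-- The coupling invariant: `comp` assigns every node the least node of its component;
-- `parent` is a forest whose links never increase, whose roots are exactly the
-- comp-fixed nodes, and along whose links comp is constant.
def KInv (parent comp : List Int) : Prop :=
  parent.length = comp.length ∧
  ∀ i : Nat, i < comp.length →
    (0 ≤ parent.getD i 0 ∧ parent.getD i 0 ≤ (i:Int)) ∧
    comp.getD (parent.getD i 0).toNat 0 = comp.getD i 0 ∧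
    (parent.getD i 0 = (i:Int) ↔ comp.getD i 0 = (i:Int)) ∧
    (0 ≤ comp.getD i 0 ∧ comp.getD i 0 ≤ (i:Int)) ∧
    comp.getD (comp.getD i 0).toNat 0 = comp.getD i 0

def okEdge (L : Nat) (e : Int × Int × Int × Int) : Prop :=
  (-(L:Int) ≤ e.1 ∧ e.1 < (L:Int)) ∧ (-(L:Int) ≤ e.2.1 ∧ e.2.1 < (L:Int))

lemma getPy (xs : List Int) (x : Int) (h0 : 0 ≤ x) (h1 : x < xs.length) :
    PySem.List.pyGetD xs x 0 = xs.getD x.toNat 0 := by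
  simp [PySem.List.pyGetD, PySem.List.pyGet?, PySem.List.pyIdx?, h0, h1]

lemma getPyNeg (xs : List Int) (x : Int) (h0 : -(xs.length : Int) ≤ x) (h1 : x < 0) :
    PySem.List.pyGetD xs x 0 = xs.getD (xs.length - (-x).toNat) 0 := by
  have hx : ¬ (0 ≤ x) := by omega
  simp [PySem.List.pyGetD, PySem.List.pyGet?, PySem.List.pyIdx?, hx, h0]

lemma setPyNeg (xs : List Int) (x : Int) (v : Int) (h0 : -(xs.length : Int) ≤ x) (h1 : x < 0) :
    PySem.List.pySetD xs x v = xs.set (xs.length - (-x).toNat) v := by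
  have hx : ¬ (0 ≤ x) := by omega
  simp [PySem.List.pySetD, PySem.List.pySet?, PySem.List.pyIdx?, hx, h0]

lemma getD_set_self (xs : List Int) (i : Nat) (h : i < xs.length) (v : Int) :
    (xs.set i v).getD i 0 = v := by
  rw [List.getD_eq_getElem?_getD]; simp [h]

lemma getD_set_ne (xs : List Int) (i j : Nat) (h : i ≠ j) (v : Int) :
    (xs.set i v).getD j 0 = xs.getD j 0 := by
  rw [List.getD_eq_getElem?_getD, List.getD_eq_getElem?_getD, List.getElem?_set_ne h]

-- KInv is preserved by redirecting any parent link to its component label.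
lemma inv_set_label (parent comp : List Int) (k : Nat) (hk : k < comp.length)
    (hInv : KInv parent comp) :
    KInv (parent.set k (comp.getD k 0)) comp := by
  obtain ⟨hlen, h⟩ := hInv
  refine ⟨by simp [hlen], fun i hi => ?_⟩
  obtain ⟨ha, hb, hc, hd, he⟩ := h i hi
  by_cases hik : i = k
  · subst hik
    rw [getD_set_self parent i (by omega)]
    exact ⟨(h i hi).2.2.2.1, (h i hi).2.2.2.2, Iff.rfl, hd, he⟩
  · rw [getD_set_ne parent k i (fun hh => hik hh.symm)]
    exact ⟨ha, hb, hc, hd, he⟩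

lemma findA_nonneg (comp : List Int) : ∀ (fuel : Nat) (parent : List Int) (x : Int),
    KInv parent comp → 0 ≤ x → x < (comp.length : Int) → x < (fuel : Int) →
    (findA fuel parent x).2 = comp.getD x.toNat 0 ∧ KInv (findA fuel parent x).1 comp := by
  intro fuel
  induction fuel with
  | zero => intro parent x _ h0 _ hf; exact absurd hf (by push_cast; omega)
  | succ f ih =>
    intro parent x hInv h0 h1 hf
    obtain ⟨hlen, h⟩ := hInv
    have hxlt : x < (parent.length : Int) := by rw [hlen]; exact h1
    have hi : x.toNat < comp.length := by omega
    have hgp : PySem.List.pyGetD parent x 0 = parent.getD x.toNat 0 := getPy parent x h0 hxlt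
    obtain ⟨⟨ha1, ha2⟩, hb, hc, hd, he⟩ := h x.toNat hi
    have hxx : ((x.toNat : Nat) : Int) = x := Int.toNat_of_nonneg h0
    rw [hxx] at ha2 hc
    by_cases hpx : parent.getD x.toNat 0 = x
    · simp only [findA, hgp]
      rw [if_neg (by simpa using hpx)]
      exact ⟨hpx.trans (hc.mp hpx).symm, ⟨hlen, h⟩⟩
    · simp only [findA, hgp]
      rw [if_pos hpx]
      have hih := ih parent (parent.getD x.toNat 0) ⟨hlen, h⟩ ha1
        (by omega) (by push_cast at hf ⊢; omega)
      set r := findA f parent (parent.getD x.toNat 0) with hr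
      have hr2 : r.2 = comp.getD x.toNat 0 := by rw [hih.1, hb]
      have hrlen : r.1.length = comp.length := hih.2.1
      have hset : PySem.List.pySetD r.1 x r.2 = r.1.set x.toNat r.2 :=
        PySem.List.pySetD_of_nonneg r.1 r.2 h0
      have hinv' : KInv (r.1.set x.toNat r.2) comp := by
        rw [hr2]; exact inv_set_label r.1 comp x.toNat hi hih.2
      constructor
      · show PySem.List.pyGetD (PySem.List.pySetD r.1 x r.2) x 0 = _
        rw [hset, getPy _ x h0 (by simp [hrlen]; omega)]
        rw [getD_set_self _ _ (by omega) _, hr2]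
      · show KInv (PySem.List.pySetD r.1 x r.2) comp
        rw [hset]; exact hinv'

lemma findA_int (fuel : Nat) (parent comp : List Int) (x : Int)
    (hInv : KInv parent comp) (h0 : -(comp.length : Int) ≤ x) (h1 : x < (comp.length : Int))
    (hf : comp.length + 1 ≤ fuel) :
    (findA fuel parent x).2 = PySem.List.pyGetD comp x 0 ∧ KInv (findA fuel parent x).1 comp := by
  by_cases hx0 : 0 ≤ x
  · have := findA_nonneg comp fuel parent x hInv hx0 h1 (by push_cast; omega)
    rw [getPy comp x hx0 h1]
    exact this
  · push_neg at hx0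
    match fuel, hf with
    | f+1, hf =>
    obtain ⟨hlen, h⟩ := hInv
    set k := comp.length - (-x).toNat with hkdef
    have hxk : 1 ≤ (-x).toNat ∧ (-x).toNat ≤ comp.length := by omega
    have hk : k < comp.length := by omega
    have hgp : PySem.List.pyGetD parent x 0 = parent.getD k 0 := by
      rw [getPyNeg parent x (by rw [hlen]; exact h0) hx0, hlen]
    obtain ⟨⟨ha1, ha2⟩, hb, hc, hd, he⟩ := h k hk
    have hpx : parent.getD k 0 ≠ x := by omega
    simp only [findA, hgp]
    rw [if_pos hpx]
    have hih := findA_nonneg comp f parent (parent.getD k 0) ⟨hlen, h⟩ ha1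
      (by push_cast; omega) (by push_cast at hf ⊢; omega)
    set r := findA f parent (parent.getD k 0) with hr
    have hr2 : r.2 = comp.getD k 0 := by rw [hih.1, hb]
    have hrlen : r.1.length = comp.length := hih.2.1
    have hset : PySem.List.pySetD r.1 x r.2 = r.1.set k r.2 := by
      rw [setPyNeg r.1 x r.2 (by rw [hrlen]; exact h0) hx0, hrlen]
    have hinv' : KInv (r.1.set k r.2) comp := by
      rw [hr2]; exact inv_set_label r.1 comp k hk hih.2
    constructor
    · show PySem.List.pyGetD (PySem.List.pySetD r.1 x r.2) x 0 = _
      rw [hset, getPyNeg _ x (by simp [hrlen]; omega) hx0]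
      simp only [List.length_set, hrlen]
      rw [getD_set_self _ _ (by omega) _, hr2, getPyNeg comp x h0 hx0]
    · show KInv (PySem.List.pySetD r.1 x r.2) comp
      rw [hset]; exact hinv'

lemma getD_map_if (comp : List Int) (f : Int → Int) (j : Nat) (hj : j < comp.length) :
    (comp.map f).getD j 0 = f (comp.getD j 0) := by
  rw [List.getD_eq_getElem?_getD, List.getD_eq_getElem?_getD, List.getElem?_map]
  simp [List.getElem?_eq_getElem hj]

-- merging the component labelled hi into the one labelled lo keeps the invariant
lemma union_core (parent comp : List Int) (lo hi : Int) (hInv : KInv parent comp)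
    (hlo0 : 0 ≤ lo) (hlohi : lo < hi) (hhi1 : hi < (comp.length : Int))
    (hrlo : comp.getD lo.toNat 0 = lo) (hrhi : comp.getD hi.toNat 0 = hi) :
    KInv (parent.set hi.toNat lo) (comp.map (fun v => if v = hi then lo else v)) := by
  obtain ⟨hlen, h⟩ := hInv
  have hhiN : hi.toNat < comp.length := by omega
  have hloN : lo.toNat < comp.length := by omega
  refine ⟨by simp [hlen], ?_⟩
  simp only [List.length_map]
  intro i hi2
  have hmap : ∀ j, j < comp.length →
      (comp.map (fun v => if v = hi then lo else v)).getD j 0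
        = if comp.getD j 0 = hi then lo else comp.getD j 0 :=
    fun j hj => getD_map_if comp _ j hj
  have hClo : (if comp.getD lo.toNat 0 = hi then lo else comp.getD lo.toNat 0) = lo := by
    rw [hrlo]; rw [if_neg (by omega)]
  obtain ⟨⟨ha1, ha2⟩, hb, hc, hd, he⟩ := h i hi2
  by_cases hih : i = hi.toNat
  · subst hih
    rw [getD_set_self parent hi.toNat (by omega) lo]
    have e1 : (comp.map (fun v => if v = hi then lo else v)).getD hi.toNat 0 = lo := by
      rw [hmap hi.toNat hhiN, hrhi, if_pos rfl]
    have e2 : (comp.map (fun v => if v = hi then lo else v)).getD lo.toNat 0 = lo := by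
      rw [hmap lo.toNat hloN]; exact hClo
    refine ⟨⟨hlo0, by omega⟩, ?_, ?_, ?_, ?_⟩
    · rw [e1, e2]
    · rw [e1]
    · rw [e1]; exact ⟨hlo0, by omega⟩
    · rw [e1, e2]
  · rw [getD_set_ne parent hi.toNat i (fun hh => hih hh.symm)]
    rw [hmap i hi2]
    have hPN : (parent.getD i 0).toNat < comp.length := by omega
    have hCN : (comp.getD i 0).toNat < comp.length := by omega
    by_cases hC : comp.getD i 0 = hi
    · have hlo_ne_i : lo ≠ (i : Int) := by
        intro hh
        have : lo.toNat = i := by omega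
        rw [this, hC] at hrlo; omega
      have hCi_ne : comp.getD i 0 ≠ (i : Int) := by
        rw [hC]; intro hh; apply hih; omega
      have hPi_ne : parent.getD i 0 ≠ (i : Int) := fun hh => hCi_ne (hc.mp hh)
      refine ⟨⟨ha1, ha2⟩, ?_, ?_, ?_, ?_⟩
      · rw [hmap _ hPN, hb, if_pos hC]
      · constructor <;> intro hh
        · exact absurd hh hPi_ne
        · rw [if_pos hC] at hh; exact absurd hh hlo_ne_i
      · rw [if_pos hC]; constructor
        · exact hlo0
        · have := hd.2; omega
      · rw [if_pos hC, hmap _ hloN, hClo]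
    · refine ⟨⟨ha1, ha2⟩, ?_, ?_, ?_, ?_⟩
      · rw [hmap _ hPN, hb]
      · rw [if_neg hC]; exact hc
      · rw [if_neg hC]; exact hd
      · rw [if_neg hC, hmap _ hCN, he, if_neg hC]

lemma label_props (parent comp : List Int) (x : Int) (hInv : KInv parent comp)
    (h0 : -(comp.length : Int) ≤ x) (h1 : x < (comp.length : Int)) :
    0 ≤ PySem.List.pyGetD comp x 0 ∧ PySem.List.pyGetD comp x 0 < (comp.length : Int) ∧
    comp.getD (PySem.List.pyGetD comp x 0).toNat 0 = PySem.List.pyGetD comp x 0 := by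
  obtain ⟨hlen, h⟩ := hInv
  by_cases hx0 : 0 ≤ x
  · rw [getPy comp x hx0 h1]
    obtain ⟨_, _, _, ⟨hd1, hd2⟩, he⟩ := h x.toNat (by omega)
    exact ⟨hd1, by omega, he⟩
  · rw [getPyNeg comp x h0 (by omega)]
    obtain ⟨_, _, _, ⟨hd1, hd2⟩, he⟩ := h (comp.length - (-x).toNat) (by omega)
    exact ⟨hd1, by omega, he⟩

lemma unionA_inv (parent comp : List Int) (p q : Int) (hInv : KInv parent comp)
    (hp0 : 0 ≤ p) (hp1 : p < (comp.length : Int)) (hq0 : 0 ≤ q) (hq1 : q < (comp.length : Int))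
    (hrp : comp.getD p.toNat 0 = p) (hrq : comp.getD q.toNat 0 = q) (hne : p ≠ q) :
    KInv (unionA parent p q) (comp.map (fun v => if v = max p q then min p q else v)) := by
  have hlen := hInv.1
  have h1 := findA_int (parent.length + 2) parent comp p hInv (by omega) hp1 (by omega)
  set f1 := findA (parent.length + 2) parent p with hf1
  have hf12 : f1.2 = p := by rw [h1.1, getPy comp p hp0 hp1, hrp]
  have hlen1 : f1.1.length = comp.length := h1.2.1
  have h2 := findA_int (f1.1.length + 2) f1.1 comp q h1.2 (by omega) hq1 (by omega)
  set f2 := findA (f1.1.length + 2) f1.1 q with hf2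
  have hf22 : f2.2 = q := by rw [h2.1, getPy comp q hq0 hq1, hrq]
  show KInv (PySem.List.pySetD f2.1 (max f1.2 f2.2) (min f1.2 f2.2)) _
  rw [hf12, hf22]
  have hmax0 : 0 ≤ max p q := le_trans hp0 (le_max_left p q)
  rw [PySem.List.pySetD_of_nonneg f2.1 (min p q) hmax0]
  exact union_core f2.1 comp (min p q) (max p q) h2.2
    (le_min hp0 hq0) (by rcases lt_or_gt_of_ne hne with hh | hh <;> simp [min_def, max_def] <;> omega)
    (by rcases le_total p q with hh | hh <;> simp [max_def, hh] <;> omega)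
    (by rcases le_total p q with hh | hh
        · rw [min_eq_left hh]; exact hrp
        · rw [min_eq_right hh]; exact hrq)
    (by rcases le_total p q with hh | hh
        · rw [max_eq_right hh]; exact hrq
        · rw [max_eq_left hh]; exact hrp)

lemma stepB_length (st : List Int × Int × Int × Int) (e : Int × Int × Int × Int) :
    (stepB st e).1.length = st.1.length := by
  simp only [stepB]; split_ifs <;> simp

lemma step_eq (parent comp : List Int) (acc : Int × Int × Int) (e : Int × Int × Int × Int)
    (hInv : KInv parent comp) (hok : okEdge comp.length e) :
    KInv (stepA (parent, acc) e).1 (stepB (comp, acc) e).1 ∧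
    (stepA (parent, acc) e).2 = (stepB (comp, acc) e).2 := by
  obtain ⟨⟨hx0, hx1⟩, ⟨hy0, hy1⟩⟩ := hok
  have hlen := hInv.1
  simp only [stepA, stepB]
  have h1 := findA_int (parent.length + 2) parent comp e.1 hInv hx0 hx1 (by omega)
  set f1 := findA (parent.length + 2) parent e.1 with hf1
  have hlen1 : f1.1.length = comp.length := h1.2.1
  have h2 := findA_int (f1.1.length + 2) f1.1 comp e.2.1 h1.2 hy0 hy1 (by omega)
  set f2 := findA (f1.1.length + 2) f1.1 e.2.1 with hf2
  set rx := PySem.List.pyGetD comp e.1 0 with hrx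
  set ry := PySem.List.pyGetD comp e.2.1 0 with hry
  obtain ⟨hrx0, hrx1, hrxr⟩ := label_props parent comp e.1 hInv hx0 hx1
  obtain ⟨hry0, hry1, hryr⟩ := label_props parent comp e.2.1 hInv hy0 hy1
  rw [h1.1, h2.1]
  by_cases hne : rx = ry
  · rw [if_neg (by simpa using hne), if_neg (by simpa using hne)]
    exact ⟨h2.2, rfl⟩
  · rw [if_pos hne, if_pos hne]
    refine ⟨?_, rfl⟩
    show KInv (unionA f2.1 rx ry) _
    have hmm : (if rx < ry then ry else rx) = max rx ry := by
      rcases le_total rx ry with hh | hh <;> simp [max_def, hh] <;> omega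
    have hmn : (if rx < ry then rx else ry) = min rx ry := by
      rcases le_total rx ry with hh | hh <;> simp [min_def, hh] <;> omega
    rw [hmm, hmn]
    exact unionA_inv f2.1 comp rx ry h2.2 hrx0 hrx1 hry0 hry1 hrxr hryr hne

lemma loop_eq (es : List (Int × Int × Int × Int)) : ∀ (parent comp : List Int) (acc : Int × Int × Int),
    KInv parent comp → (∀ e ∈ es, okEdge comp.length e) →
    KInv (es.foldl stepA (parent, acc)).1 (es.foldl stepB (comp, acc)).1 ∧
    (es.foldl stepA (parent, acc)).2 = (es.foldl stepB (comp, acc)).2 := by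
  induction es with
  | nil => intro parent comp acc hInv _; exact ⟨hInv, rfl⟩
  | cons e es ih =>
    intro parent comp acc hInv hok
    rw [List.foldl_cons, List.foldl_cons]
    have hs := step_eq parent comp acc e hInv (hok e (by simp))
    have hA : stepA (parent, acc) e = ((stepA (parent, acc) e).1, (stepA (parent, acc) e).2) := rfl
    have hB : stepB (comp, acc) e = ((stepB (comp, acc) e).1, (stepB (comp, acc) e).2) := rfl
    rw [hA, hB, ← hs.2]
    have hok' : ∀ e' ∈ es, okEdge (stepB (comp, acc) e).1.length e' := by
      intro e' he'
      rw [show (stepB (comp, acc) e).1.length = comp.length from stepB_length (comp, acc) e]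
      exact hok e' (by simp [he'])
    exact ih (stepA (parent, acc) e).1 (stepB (comp, acc) e).1 (stepA (parent, acc) e).2 hs.1 hok'

lemma inv_init (n : Int) : KInv (PySem.List.pyRange 0 (n+1) 1) (PySem.List.pyRange 0 (n+1) 1) := by
  have hid : ∀ i : Nat, i < (PySem.List.pyRange 0 (n+1) 1).length →
      (PySem.List.pyRange 0 (n+1) 1).getD i 0 = (i : Int) := by
    intro i hi
    rw [PySem.List.pyRange_one] at hi ⊢
    simp only [List.length_map, List.length_range] at hi
    rw [List.getD_eq_getElem?_getD, List.getElem?_map,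
      List.getElem?_range (show i < (n+1-0).toNat by omega)]
    simp
  refine ⟨rfl, fun i hi => ?_⟩
  have h1 := hid i hi
  have h2 : ((i:Int)).toNat = i := rfl
  rw [h1, h2, h1]
  exact ⟨⟨by omega, le_refl _⟩, rfl, Iff.rfl, ⟨by omega, le_refl _⟩, rfl⟩

-- ===== VERDICT (by name: the statement is the Claim_ definition above) =====
theorem solve_spec : Claim_equal_solve := by
  intro n q edge _ hpre
  show solve n q edge = solve_alt n q edge
  simp only [solve, solve_alt]
  have hlen : (PySem.List.pyRange 0 (n+1) 1).length = (n+1-0).toNat :=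
    PySem.List.length_pyRange_one 0 (n+1)
  have hok : ∀ e ∈ PySem.List.sorted2 edge (fun e => e.2.2.1) (fun e => e.2.2.2),
      okEdge (PySem.List.pyRange 0 (n+1) 1).length e := by
    intro e he
    have hmem : e ∈ edge := (PySem.List.sorted2_perm edge _ _ false).mem_iff.mp he
    obtain ⟨⟨h1, h2⟩, h3, h4⟩ := hpre e hmem
    rw [hlen]
    exact ⟨⟨by omega, by omega⟩, ⟨by omega, by omega⟩⟩
  have h := loop_eq (PySem.List.sorted2 edge (fun e => e.2.2.1) (fun e => e.2.2.2))
    (PySem.List.pyRange 0 (n+1) 1) (PySem.List.pyRange 0 (n+1) 1) (0, 0, 0) (inv_init n) hok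
  rw [h.2]
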